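-- pv_equiv track=rewrite | github.com/Kartik-Bhatnagar/Leet_code_problems | Medium/592_Fraction_Addition_and_Subtraction/592.py | op_frac_list
-- ===== SOURCE A (Python) =====
-- def op_frac_list(expression):
--     op = []
--
--     if expression[0]!="-":#if the first number is poistive
--         op.append("+")
--     else:
--         op.append("-")
--         expression = expression[1:]
--     fr_num = ""
--     frac_nums=[]
--     for e in expression:
--         if e =="+" or e =="-":
--             op.append(e)
--             frac_nums.append(fr_num)
--             fr_num=""
--         else:
--             fr_num+= e
--     frac_nums.append(fr_num)
--     return op,frac_nums
-- ===== SOURCE B (Python) =====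
-- def op_frac_list(expression):
--     # token-at-a-time scan over a sign-prefix-normalized copy (return value only)
--     s = expression if expression[0] == "-" else "+" + expression
--     op, frac_nums = [], []
--     i, n = 0, len(s)
--     while i < n:
--         j = i + 1
--         while j < n and s[j] not in "+-":
--             j += 1
--         op.append(s[i])
--         frac_nums.append(s[i + 1:j])
--         i = j
--     return op, frac_nums
-- ===== Notes on version B (the rewrite author's own statement) =====
-- stated objective: alternative
-- what changed: A does one per-character pass with a string accumulator flushed at each sign and a dual-branch initialization; B first normalizes the input by prepending a plus sign unless the first character is a minus sign, then scans token-at-a-time: each iteration reads the sign character, advances an index to the next sign, and slices the body out.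
import Mathlib
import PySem

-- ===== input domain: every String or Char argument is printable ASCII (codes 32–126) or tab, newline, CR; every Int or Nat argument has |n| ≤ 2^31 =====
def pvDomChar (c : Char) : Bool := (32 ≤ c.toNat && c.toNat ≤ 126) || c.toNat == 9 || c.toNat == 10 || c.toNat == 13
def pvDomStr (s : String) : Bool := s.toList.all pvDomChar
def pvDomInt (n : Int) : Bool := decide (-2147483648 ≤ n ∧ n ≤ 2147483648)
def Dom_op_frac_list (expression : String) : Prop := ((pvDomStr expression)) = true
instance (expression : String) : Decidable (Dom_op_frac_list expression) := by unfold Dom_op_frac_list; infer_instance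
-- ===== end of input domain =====

-- B replaces A's per-character accumulator (flush on sign, dual initialization) by a
-- token-at-a-time scan of a sign-prefix-normalized copy, slicing each body out; objective: alternative.

-- ===== PORT A =====
-- A's loop body; the Python fr_num string is carried as List Char (exact: fr_num += e is fr ++ [e]).
def pvStepA (st : List String × List Char × List String) (e : Char) :
    List String × List Char × List String :=
  if e == '+' || e == '-' then
    (st.1 ++ [String.ofList [e]], ([] : List Char), st.2.2 ++ [String.ofList st.2.1])
  else
    (st.1, st.2.1 ++ [e], st.2.2)

def op_frac_list (expression : String) : List String × List String :=
  match PySem.Str.pyGet? expression 0 with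
  | none => ([], [])   -- Python raises IndexError here; excluded by Pre_op_frac_list
  | some c0 =>
    let (op, cs) :=
      if c0 ≠ '-' then ((["+"] : List String), expression.toList)
      else (["-"], PySem.List.slice expression.toList (some 1) none)
    let res := cs.foldl pvStepA (op, ([] : List Char), ([] : List String))
    (res.1, res.2.2 ++ [String.ofList res.2.1])

-- ===== PORT B =====
-- B's inner scan `while j < n and s[j] not in "+-"`: the suffix s[i+1:] is consumed char by
-- char, returning (body = s[i+1:j], rest = s[j:]) — exact, indices represented by suffixes.
def pvScanBody : List Char → List Char × List Char
  | [] => ([], [])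
  | c :: t =>
    if c == '+' || c == '-' then ([], c :: t)
    else
      let br := pvScanBody t
      (c :: br.1, br.2)

theorem pvScanBody_len (t : List Char) : (pvScanBody t).2.length ≤ t.length := by
  induction t with
  | nil => simp [pvScanBody]
  | cons c t ih =>
    simp only [pvScanBody]
    split
    · simp
    · simpa using Nat.le_succ_of_le ih

-- B's outer while loop over i, one token (sign + body) per iteration.
def pvParse : List Char → List String × List String
  | [] => ([], [])
  | c :: t =>
    let br := pvScanBody t
    let rest := pvParse br.2
    (String.ofList [c] :: rest.1, String.ofList br.1 :: rest.2)
termination_by t => t.length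
decreasing_by
  have := pvScanBody_len t
  simpa using Nat.lt_succ_of_le this

def op_frac_list_alt (expression : String) : List String × List String :=
  match PySem.Str.pyGet? expression 0 with
  | none => ([], [])   -- Python raises IndexError here; excluded by Pre_op_frac_list
  | some c0 =>
    let s := if c0 == '-' then expression.toList else '+' :: expression.toList
    pvParse s

-- ===== PRECONDITION & SPEC =====
-- Pre_ excludes only the empty string, on which Python A raises IndexError (expression[0]).
def Pre_op_frac_list (expression : String) : Prop := expression ≠ ""
instance (expression : String) : Decidable (Pre_op_frac_list expression) := by
  unfold Pre_op_frac_list; infer_instance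
def pvWitness_op_frac_list : String := "-1/2+1/3"

def Spec_op_frac_list (expression : String) (out : List String × List String) : Prop := out = op_frac_list_alt expression
instance (expression : String) (out : List String × List String) : Decidable (Spec_op_frac_list expression out) := by unfold Spec_op_frac_list; infer_instance

-- ===== CLAIM (what is proved, stated in full; the proofs are below) =====
def Claim_equal_op_frac_list : Prop := ∀ (expression : String), Dom_op_frac_list expression → Pre_op_frac_list expression → Spec_op_frac_list expression (op_frac_list expression)

-- ===== LEMMAS AND PROOFS =====

-- A's loop, run from any state, produces B's remaining tokens.
theorem pvLoopA_key (t : List Char) :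
    ∀ (op : List String) (fr : List Char) (fracs : List String),
    (let res := t.foldl pvStepA (op, fr, fracs)
     ((res.1, res.2.2 ++ [String.ofList res.2.1]) : List String × List String))
    = (op ++ (pvParse (pvScanBody t).2).1,
       fracs ++ String.ofList (fr ++ (pvScanBody t).1) :: (pvParse (pvScanBody t).2).2) := by
  induction t with
  | nil => intro op fr fracs; simp [pvScanBody, pvParse]
  | cons c t ih =>
    intro op fr fracs
    by_cases hc : (c == '+' || c == '-') = true
    · simp only [List.foldl_cons, pvStepA, hc, if_pos, pvScanBody]
      rw [ih]
      have hp : pvParse (c :: t)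
          = (String.ofList [c] :: (pvParse (pvScanBody t).2).1,
             String.ofList (pvScanBody t).1 :: (pvParse (pvScanBody t).2).2) := by
        rw [pvParse]
      simp [hp]
    · simp only [List.foldl_cons, pvStepA, hc, if_neg, Bool.false_eq_true, not_false_iff]
      rw [ih]
      simp only [pvScanBody, hc, if_neg, Bool.false_eq_true, not_false_iff]
      simp

-- ===== VERDICT (by name: the statement is the Claim_ definition above) =====
theorem op_frac_list_spec : Claim_equal_op_frac_list := by
  intro expression _ hpre
  unfold Spec_op_frac_list op_frac_list op_frac_list_alt
  have hne : expression.toList ≠ [] :=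
    fun h => hpre (String.toList_eq_nil_iff.mp h)
  obtain ⟨c, t, hct⟩ := List.exists_cons_of_ne_nil hne
  have hget : PySem.Str.pyGet? expression 0 = some c := by
    simp [PySem.Str.pyGet?, hct]
  rw [hget]
  by_cases hc : c = '-'
  · subst hc
    rw [hct]
    rw [show PySem.List.slice ('-' :: t) (some 1) none = t by
      simpa using PySem.List.slice_from_one ('-' :: t)]
    simp only [ne_eq, not_true_eq_false, if_false, beq_self_eq_true, if_true]
    rw [pvLoopA_key]
    rw [pvParse]
    have h : String.ofList ['-'] = "-" := by decide
    simp only [List.nil_append, List.singleton_append, h]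
  · have hb : (c == '-') = false := by simpa using hc
    rw [hct]
    simp only [ne_eq, hc, not_false_iff, if_true, hb, Bool.false_eq_true, if_false]
    rw [pvLoopA_key]
    rw [pvParse]
    have h : String.ofList ['+'] = "+" := by decide
    simp only [List.nil_append, List.singleton_append, h]
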